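-- pv_equiv track=rewrite | github.com/jsntj/Analysing-Hamburg-bus-5-using-gtfs-data | analyze_bus5_density.py | build_direction_labels
-- ===== SOURCE A (Python) =====
-- from collections import Counter, defaultdict
--
-- def build_direction_labels(
--     trip_rows: dict[str, list[tuple[int, str, int | None, int | None]]],
--     stops: dict[str, dict[str, float | str]],
-- ) -> dict[str, str]:
--     pair_counts: Counter[tuple[str, str]] = Counter()
--     first_last_by_trip: dict[str, tuple[str, str]] = {}
--
--     for trip_id, rows in trip_rows.items():
--         ordered = sorted(rows, key=lambda item: item[0])
--         if not ordered:
--             continue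
--         first_stop = ordered[0][1]
--         last_stop = ordered[-1][1]
--         pair = (first_stop, last_stop)
--         first_last_by_trip[trip_id] = pair
--         pair_counts[pair] += 1
--
--     top_pairs = pair_counts.most_common(2)
--     if len(top_pairs) < 2:
--         return {trip_id: "all_trips" for trip_id in trip_rows}
--
--     labels: dict[tuple[str, str], str] = {}
--     for index, (pair, _) in enumerate(top_pairs, start=1):
--         origin = stops.get(pair[0], {}).get("stop_name", pair[0])
--         destination = stops.get(pair[1], {}).get("stop_name", pair[1])
--         labels[pair] = f"direction_{index}: {origin} -> {destination}"
--
--     fallback = labels[top_pairs[0][0]]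
--     return {trip_id: labels.get(first_last_by_trip.get(trip_id, ("", "")), fallback) for trip_id in trip_rows}
-- ===== SOURCE B (Python) =====
-- def build_direction_labels(
--     trip_rows: dict[str, list[tuple[int, str, int | None, int | None]]],
--     stops: dict[str, dict[str, float | str]],
-- ) -> dict[str, str]:
--     # One linear pass per trip (no sorting): the stable-sort head is the first
--     # row with minimal sequence, the stable-sort tail is the last row with
--     # maximal sequence; top-2 pair selection is a single running (best, second) scan.
--     pair_counts: dict[tuple[str, str], int] = {}
--     first_last: dict[str, tuple[str, str]] = {}
--     for trip_id, rows in trip_rows.items():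
--         if not rows:
--             continue
--         min_seq = max_seq = rows[0][0]
--         first_stop = last_stop = rows[0][1]
--         for row in rows[1:]:
--             if row[0] < min_seq:
--                 min_seq, first_stop = row[0], row[1]
--             if row[0] >= max_seq:
--                 max_seq, last_stop = row[0], row[1]
--         pair = (first_stop, last_stop)
--         first_last[trip_id] = pair
--         pair_counts[pair] = pair_counts.get(pair, 0) + 1
--
--     items = list(pair_counts.items())
--     if len(items) < 2:
--         return {trip_id: "all_trips" for trip_id in trip_rows}
--
--     if items[1][1] > items[0][1]:
--         best, second = items[1], items[0]
--     else:
--         best, second = items[0], items[1]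
--     for item in items[2:]:
--         if item[1] > best[1]:
--             best, second = item, best
--         elif item[1] > second[1]:
--             second = item
--
--     def label(index: int, pair: tuple[str, str]) -> str:
--         origin = stops.get(pair[0], {}).get("stop_name", pair[0])
--         destination = stops.get(pair[1], {}).get("stop_name", pair[1])
--         return f"direction_{index}: {origin} -> {destination}"
--
--     lab1 = label(1, best[0])
--     lab2 = label(2, second[0])
--     return {t: lab2 if first_last.get(t, ("", "")) == second[0] else lab1 for t in trip_rows}
-- ===== Notes on version B (the rewrite author's own statement) =====
-- stated objective: alternative
-- what changed: Replaces the per-trip stable sort with a single linear min/max scan (first row with minimal sequence, last row with maximal sequence) and Counter.most_common(2) with one running (best, second) pass over the pair counts, so nothing is ever sorted.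
import Mathlib
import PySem

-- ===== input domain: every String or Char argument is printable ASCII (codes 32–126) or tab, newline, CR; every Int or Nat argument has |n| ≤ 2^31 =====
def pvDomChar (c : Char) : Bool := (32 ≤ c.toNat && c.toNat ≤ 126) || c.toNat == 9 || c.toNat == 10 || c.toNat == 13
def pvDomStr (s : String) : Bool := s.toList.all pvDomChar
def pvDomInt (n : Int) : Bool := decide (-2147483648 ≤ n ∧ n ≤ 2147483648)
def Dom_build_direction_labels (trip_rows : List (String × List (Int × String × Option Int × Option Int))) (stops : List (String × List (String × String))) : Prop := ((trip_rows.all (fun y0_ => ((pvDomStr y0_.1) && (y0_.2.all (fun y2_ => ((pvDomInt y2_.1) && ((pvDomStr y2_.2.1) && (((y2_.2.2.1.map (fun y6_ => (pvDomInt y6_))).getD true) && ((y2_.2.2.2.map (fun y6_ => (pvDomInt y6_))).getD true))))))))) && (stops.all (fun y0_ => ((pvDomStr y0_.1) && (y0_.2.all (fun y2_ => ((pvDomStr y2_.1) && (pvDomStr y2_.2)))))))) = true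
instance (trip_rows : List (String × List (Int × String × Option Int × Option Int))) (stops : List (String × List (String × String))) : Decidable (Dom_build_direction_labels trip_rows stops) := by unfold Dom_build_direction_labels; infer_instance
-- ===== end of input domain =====

-- B replaces the per-trip stable sort by one linear min/max scan and Counter.most_common(2)
-- by one running (best, second) scan: same output, no sorting anywhere (objective: alternative).

-- helpers shared by both ports (both Pythons contain this identical lookup/format code):
-- stops.get(p, {}).get("stop_name", p)
def pvStopName (stops : List (String × List (String × String))) (s : String) : String :=
  (PySem.Dict.mk ((PySem.Dict.mk stops).getD s [])).getD "stop_name" s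

-- f"direction_{index}: {origin} -> {destination}"
def pvLabel (stops : List (String × List (String × String))) (index : Int) (pair : String × String) : String :=
  "direction_" ++ PySem.Int.toStr index ++ ": " ++ pvStopName stops pair.1 ++ " -> " ++ pvStopName stops pair.2

-- ===== PORT A =====
-- trip_rows.items() / the final dict comprehensions iterate the association list directly
-- (a Python dict has unique keys); ordered[0] / ordered[-1] are read off the nonempty match.
def pvStepA (st : PySem.Dict (String × String) Int × PySem.Dict String (String × String)) (tr : String × List (Int × String × Option Int × Option Int)) : PySem.Dict (String × String) Int × PySem.Dict String (String × String) :=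
  match PySem.List.sorted tr.2 (fun item => item.1) with
  | [] => st
  | f :: rest =>
    let first_stop := f.2.1
    let last_stop := ((f :: rest).getLast (List.cons_ne_nil f rest)).2.1
    let pair := (first_stop, last_stop)
    (st.1.modify pair 0 (· + 1), st.2.insert tr.1 pair)

def build_direction_labels (trip_rows : List (String × List (Int × String × Option Int × Option Int))) (stops : List (String × List (String × String))) : List (String × String) :=
  let st := trip_rows.foldl pvStepA (PySem.Dict.empty, PySem.Dict.empty)
  let top_pairs := (PySem.List.sorted st.1.items (fun kv => kv.2) true).take 2
  if top_pairs.length < 2 then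
    trip_rows.map (fun tr => (tr.1, "all_trips"))
  else
    let labels := (PySem.List.enumerate top_pairs 1).foldl
      (fun (d : PySem.Dict (String × String) String) ip => d.insert ip.2.1 (pvLabel stops ip.1 ip.2.1))
      PySem.Dict.empty
    -- labels[top_pairs[0][0]]: the key is always present, "" is a dead default
    let fallback := labels.getD (top_pairs.headD (("", ""), 0)).1 ""
    trip_rows.map (fun tr => (tr.1, labels.getD (st.2.getD tr.1 ("", "")) fallback))

-- ===== PORT B =====
def pvStepB (st : PySem.Dict (String × String) Int × PySem.Dict String (String × String)) (tr : String × List (Int × String × Option Int × Option Int)) : PySem.Dict (String × String) Int × PySem.Dict String (String × String) :=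
  match tr.2 with
  | [] => st
  | r0 :: rows1 =>
    let q := rows1.foldl
      (fun (q : (Int × String) × (Int × String)) row =>
        ((if row.1 < q.1.1 then (row.1, row.2.1) else q.1),
         (if row.1 ≥ q.2.1 then (row.1, row.2.1) else q.2)))
      ((r0.1, r0.2.1), (r0.1, r0.2.1))
    let pair := (q.1.2, q.2.2)
    (st.1.insert pair (st.1.getD pair 0 + 1), st.2.insert tr.1 pair)

def build_direction_labels_alt (trip_rows : List (String × List (Int × String × Option Int × Option Int))) (stops : List (String × List (String × String))) : List (String × String) :=
  let st := trip_rows.foldl pvStepB (PySem.Dict.empty, PySem.Dict.empty)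
  match st.1.items with
  | [] => trip_rows.map (fun tr => (tr.1, "all_trips"))
  | [_] => trip_rows.map (fun tr => (tr.1, "all_trips"))
  | i0 :: i1 :: rest =>
    let bs := rest.foldl
      (fun (p : ((String × String) × Int) × ((String × String) × Int)) item =>
        if item.2 > p.1.2 then (item, p.1)
        else if item.2 > p.2.2 then (p.1, item)
        else p)
      (if i1.2 > i0.2 then (i1, i0) else (i0, i1))
    let lab1 := pvLabel stops 1 bs.1.1
    let lab2 := pvLabel stops 2 bs.2.1
    trip_rows.map (fun tr => (tr.1, if st.2.getD tr.1 ("", "") = bs.2.1 then lab2 else lab1))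

-- ===== PRECONDITION & SPEC =====
def Spec_build_direction_labels (trip_rows : List (String × List (Int × String × Option Int × Option Int))) (stops : List (String × List (String × String))) (out : List (String × String)) : Prop := out = build_direction_labels_alt trip_rows stops
instance (trip_rows : List (String × List (Int × String × Option Int × Option Int))) (stops : List (String × List (String × String))) (out : List (String × String)) : Decidable (Spec_build_direction_labels trip_rows stops out) := by unfold Spec_build_direction_labels; infer_instance

-- ===== CLAIM (what is proved, stated in full; the proofs are below) =====
def Claim_equal_build_direction_labels : Prop := ∀ (trip_rows : List (String × List (Int × String × Option Int × Option Int))) (stops : List (String × List (String × String))), Dom_build_direction_labels trip_rows stops → Spec_build_direction_labels trip_rows stops (build_direction_labels trip_rows stops)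

-- ===== LEMMAS AND PROOFS =====

-- a property preserved by every step of a left fold holds of the result
theorem pvFoldlPres {β S : Type} (f : S → β → S) (P : S → Prop)
    (h : ∀ s x, P s → P (f s x)) : ∀ (l : List β) (s : S), P s → P (l.foldl f s) := by
  intro l
  induction l with
  | nil => intro s hs; exact hs
  | cons x xs ih => intro s hs; exact ih _ (h s x hs)

theorem pvInsertBy_cons {α : Type} (bef : α → α → Bool) (x y : α) (ys : List α) :
    PySem.List.insertBy bef x (y :: ys) = if bef x y then x :: y :: ys else y :: PySem.List.insertBy bef x ys := rfl

theorem pvInsertBy_nil {α : Type} (bef : α → α → Bool) (x : α) :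
    PySem.List.insertBy bef x [] = [x] := rfl

-- head/last of one ascending insertion, as B's min/max updates see them
theorem pvInsertLast (x : Int × String × Option Int × Option Int) :
    ∀ (t : List (Int × String × Option Int × Option Int)) (a : Int × String × Option Int × Option Int),
    (a :: t).Pairwise (fun u v => u.1 ≤ v.1) →
    ∃ a' t', PySem.List.insertBy (fun u v => decide (u.1 < v.1)) x (a :: t) = a' :: t'
      ∧ a' = (if x.1 < a.1 then x else a)
      ∧ (a' :: t').getLast (List.cons_ne_nil a' t')
          = (if ((a :: t).getLast (List.cons_ne_nil a t)).1 ≤ x.1 then x else (a :: t).getLast (List.cons_ne_nil a t)) := by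
  intro t
  induction t with
  | nil =>
    intro a _
    by_cases h : x.1 < a.1
    · refine ⟨x, [a], by rw [pvInsertBy_cons]; simp [h], by simp [h], ?_⟩
      simp [List.getLast]
      omega
    · refine ⟨a, [x], by rw [pvInsertBy_cons, pvInsertBy_nil]; simp [h], by simp [h], ?_⟩
      simp [List.getLast]
      omega
  | cons b t' ih =>
    intro a hp
    by_cases h : x.1 < a.1
    · refine ⟨x, a :: b :: t', by rw [pvInsertBy_cons]; simp [h], by simp [h], ?_⟩
      have hlast : (a :: b :: t').getLast (List.cons_ne_nil a (b :: t')) ∈ a :: b :: t' := List.getLast_mem _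
      have hle : a.1 ≤ ((a :: b :: t').getLast (List.cons_ne_nil a (b :: t'))).1 := by
        rcases List.mem_cons.mp hlast with h1 | h2
        · rw [h1]
        · exact (List.pairwise_cons.mp hp).1 _ h2
      have hbt : ((a :: b :: t').getLast (List.cons_ne_nil a (b :: t'))) = ((b :: t').getLast (List.cons_ne_nil b t')) := List.getLast_cons (List.cons_ne_nil b t')
      rw [hbt] at hle
      have hnot : ¬ ((b :: t').getLast (List.cons_ne_nil b t')).1 ≤ x.1 := by omega
      simp [List.getLast_cons, hnot]
    · obtain ⟨a'', t'', heq, _, hlast⟩ := ih b (List.pairwise_cons.mp hp).2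
      refine ⟨a, a'' :: t'', ?_, by simp [h], ?_⟩
      · rw [pvInsertBy_cons, if_neg (by simpa using h), heq]
      · rw [List.getLast_cons (List.cons_ne_nil a'' t''), List.getLast_cons (List.cons_ne_nil b t')]
        exact hlast

-- the per-trip loop: B's single (min, max) scan reads the head and last of A's insertion sort
theorem pvMmLoop :
    ∀ (rows : List (Int × String × Option Int × Option Int))
      (a : Int × String × Option Int × Option Int) (t : List (Int × String × Option Int × Option Int))
      (q : (Int × String) × (Int × String)),
    (a :: t).Pairwise (fun u v => u.1 ≤ v.1) →
    q.1 = (a.1, a.2.1) →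
    q.2 = (((a :: t).getLast (List.cons_ne_nil a t)).1, ((a :: t).getLast (List.cons_ne_nil a t)).2.1) →
    ∃ a' t',
      rows.foldl (fun acc x => PySem.List.insertBy (fun u v => decide (u.1 < v.1)) x acc) (a :: t) = a' :: t'
      ∧ (a' :: t').Pairwise (fun u v => u.1 ≤ v.1)
      ∧ (rows.foldl
          (fun (q : (Int × String) × (Int × String)) row =>
            ((if row.1 < q.1.1 then (row.1, row.2.1) else q.1),
             (if row.1 ≥ q.2.1 then (row.1, row.2.1) else q.2))) q).1 = (a'.1, a'.2.1)
      ∧ (rows.foldl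
          (fun (q : (Int × String) × (Int × String)) row =>
            ((if row.1 < q.1.1 then (row.1, row.2.1) else q.1),
             (if row.1 ≥ q.2.1 then (row.1, row.2.1) else q.2))) q).2
          = (((a' :: t').getLast (List.cons_ne_nil a' t')).1, ((a' :: t').getLast (List.cons_ne_nil a' t')).2.1) := by
  intro rows
  induction rows with
  | nil =>
    intro a t q hp h1 h2
    exact ⟨a, t, rfl, hp, h1, h2⟩
  | cons r rs ih =>
    intro a t q hp h1 h2
    obtain ⟨a'', t'', heq, ha'', hlast⟩ := pvInsertLast r t a hp
    have hpw : (PySem.List.insertBy (fun u v => decide (u.1 < v.1)) r (a :: t)).Pairwise (fun u v => u.1 ≤ v.1) :=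
      PySem.List.insertBy_pairwise_le (fun z => z.1) r _ hp
    rw [heq] at hpw
    rw [List.foldl_cons, List.foldl_cons, heq]
    apply ih a'' t'' _ hpw
    · rw [ha'']
      simp only [h1]
      by_cases hc : r.1 < a.1 <;> simp [hc]
    · rw [hlast]
      simp only [h2]
      by_cases hc : ((a :: t).getLast (List.cons_ne_nil a t)).1 ≤ r.1 <;>
        simp [hc, ge_iff_le]

-- the top-2 loop: B's running (best, second) pair is the first two of A's descending insertion sort
theorem pvTop2Loop :
    ∀ (rest : List ((String × String) × Int)) (a b : (String × String) × Int) (t : List ((String × String) × Int)),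
    (a :: b :: t).Pairwise (fun u v => v.2 ≤ u.2) →
    ∃ t',
      rest.foldl (fun acc x => PySem.List.insertBy (fun u v => decide (v.2 < u.2)) x acc) (a :: b :: t)
        = (rest.foldl
            (fun (p : ((String × String) × Int) × ((String × String) × Int)) item =>
              if item.2 > p.1.2 then (item, p.1)
              else if item.2 > p.2.2 then (p.1, item)
              else p) (a, b)).1
          :: (rest.foldl
            (fun (p : ((String × String) × Int) × ((String × String) × Int)) item =>
              if item.2 > p.1.2 then (item, p.1)
              else if item.2 > p.2.2 then (p.1, item)
              else p) (a, b)).2 :: t'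
      ∧ ((rest.foldl
            (fun (p : ((String × String) × Int) × ((String × String) × Int)) item =>
              if item.2 > p.1.2 then (item, p.1)
              else if item.2 > p.2.2 then (p.1, item)
              else p) (a, b)).1
          :: (rest.foldl
            (fun (p : ((String × String) × Int) × ((String × String) × Int)) item =>
              if item.2 > p.1.2 then (item, p.1)
              else if item.2 > p.2.2 then (p.1, item)
              else p) (a, b)).2 :: t').Pairwise (fun u v => v.2 ≤ u.2) := by
  intro rest
  induction rest with
  | nil =>
    intro a b t hp
    exact ⟨t, rfl, hp⟩
  | cons x xs ih =>
    intro a b t hp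
    have hpw : (PySem.List.insertBy (fun u v => decide (v.2 < u.2)) x (a :: b :: t)).Pairwise (fun u v => v.2 ≤ u.2) :=
      PySem.List.insertBy_pairwise_ge (fun z => z.2) x _ hp
    rw [List.foldl_cons, List.foldl_cons]
    by_cases h1 : a.2 < x.2
    · have hsh : PySem.List.insertBy (fun u v => decide (v.2 < u.2)) x (a :: b :: t) = x :: a :: b :: t := by
        rw [pvInsertBy_cons]; simp [h1]
      rw [hsh] at hpw
      rw [hsh, if_pos (show x.2 > a.2 from h1)]
      exact ih x a (b :: t) hpw
    · by_cases h2 : b.2 < x.2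
      · have hsh : PySem.List.insertBy (fun u v => decide (v.2 < u.2)) x (a :: b :: t) = a :: x :: b :: t := by
          rw [pvInsertBy_cons, if_neg (by simpa using h1), pvInsertBy_cons]; simp [h2]
        rw [hsh] at hpw
        rw [hsh, if_neg (show ¬ x.2 > a.2 from h1), if_pos (show x.2 > b.2 from h2)]
        exact ih a x (b :: t) hpw
      · have hsh : PySem.List.insertBy (fun u v => decide (v.2 < u.2)) x (a :: b :: t)
            = a :: b :: PySem.List.insertBy (fun u v => decide (v.2 < u.2)) x t := by
          rw [pvInsertBy_cons, if_neg (by simpa using h1), pvInsertBy_cons, if_neg (by simpa using h2)]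
        rw [hsh] at hpw
        rw [hsh, if_neg (show ¬ x.2 > a.2 from h1), if_neg (show ¬ x.2 > b.2 from h2)]
        exact ih a b _ hpw

-- the two per-trip folds build identical dictionaries
theorem pvStepEq : pvStepA = pvStepB := by
  funext st tr
  obtain ⟨tid, rws⟩ := tr
  cases rws with
  | nil => rfl
  | cons r0 rows =>
    have hs0 : PySem.List.sorted (r0 :: rows) (fun item => item.1)
        = rows.foldl (fun acc x => PySem.List.insertBy (fun u v => decide (u.1 < v.1)) x acc) [r0] := by
      rw [PySem.List.sorted_eq_foldl_insertBy]
      rfl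
    obtain ⟨a', t', heq, _, hfst, hsnd⟩ :=
      pvMmLoop rows r0 [] ((r0.1, r0.2.1), (r0.1, r0.2.1)) (by simp) rfl (by simp [List.getLast])
    simp only [pvStepA, pvStepB, hs0, heq]
    simp [PySem.Dict.modify, hfst, hsnd]

theorem pvEnum2 {α : Type} (x y : α) : PySem.List.enumerate [x, y] 1 = [(1, x), (2, y)] := rfl

-- ===== VERDICT (by name: the statement is the Claim_ definition above) =====
theorem build_direction_labels_spec : Claim_equal_build_direction_labels := by
  intro trip_rows stops _
  unfold Spec_build_direction_labels build_direction_labels build_direction_labels_alt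
  rw [pvStepEq]
  have hnd : (trip_rows.foldl pvStepB (PySem.Dict.empty, PySem.Dict.empty)).1.keys.Nodup := by
    apply pvFoldlPres pvStepB (fun s => s.1.keys.Nodup)
    · intro s x h
      obtain ⟨tid, rws⟩ := x
      cases rws with
      | nil => exact h
      | cons r0 rows => exact PySem.Dict.nodup_keys_insert _ _ _ h
    · simp [PySem.Dict.keys, PySem.Dict.empty]
  generalize hCdef : trip_rows.foldl pvStepB (PySem.Dict.empty, PySem.Dict.empty) = C at hnd ⊢
  clear hCdef
  dsimp only
  rcases hI : C.1.items with _ | ⟨i0, _ | ⟨i1, rest⟩⟩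
  · simp [show PySem.List.sorted ([] : List ((String × String) × Int)) (fun kv => kv.2) true = [] from rfl]
  · simp [show PySem.List.sorted [i0] (fun kv => kv.2) true = [i0] from rfl]
  · -- at least two distinct first/last pairs
    dsimp only
    have hs' : PySem.List.sorted (i0 :: i1 :: rest) (fun kv => kv.2) true
        = rest.foldl (fun acc x => PySem.List.insertBy (fun u v => decide (v.2 < u.2)) x acc)
            (PySem.List.insertBy (fun u v => decide (v.2 < u.2)) i1 [i0]) := by
      rw [PySem.List.sorted_rev_eq_foldl_insertBy]
      rfl
    by_cases h0 : i1.2 > i0.2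
    · have hb : PySem.List.insertBy (fun u v => decide (v.2 < u.2)) i1 [i0] = [i1, i0] := by
        rw [pvInsertBy_cons]
        simp [h0]
      obtain ⟨t', heq, _⟩ := pvTop2Loop rest i1 i0 [] (by simp; omega)
      rw [if_pos h0]
      set F := rest.foldl
        (fun (p : ((String × String) × Int) × ((String × String) × Int)) item =>
          if item.2 > p.1.2 then (item, p.1)
          else if item.2 > p.2.2 then (p.1, item)
          else p) (i1, i0) with hF
      rw [hs', hb, heq]
      have hperm : (F.1 :: F.2 :: t').Perm (i0 :: i1 :: rest) := by
        have hp := PySem.List.sorted_perm (i0 :: i1 :: rest) (fun kv => kv.2) true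
        rw [hs', hb, heq] at hp
        exact hp
      have hnd' : ((i0 :: i1 :: rest).map (fun x => x.1)).Nodup := by
        simp only [PySem.Dict.keys, hI] at hnd
        exact hnd
      have hndF : ((F.1 :: F.2 :: t').map (fun x => x.1)).Nodup :=
        ((hperm.map (fun x => x.1)).nodup_iff).mpr hnd'
      have hne : F.1.1 ≠ F.2.1 := by
        simp only [List.map_cons, List.nodup_cons, List.mem_cons] at hndF
        exact fun h => hndF.1 (Or.inl h)
      simp only [List.take_succ_cons, List.take_zero, List.length_cons, List.length_nil]
      rw [if_neg (by omega)]
      rw [pvEnum2]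
      simp only [List.foldl_cons, List.foldl_nil, List.headD_cons]
      have hlab : ((PySem.Dict.empty.insert F.1.1 (pvLabel stops 1 F.1.1)).insert F.2.1 (pvLabel stops 2 F.2.1)).items
          = [(F.1.1, pvLabel stops 1 F.1.1), (F.2.1, pvLabel stops 2 F.2.1)] := by
        simp [PySem.Dict.insert, PySem.Dict.empty, PySem.Dict.contains, hne]
      have hget : ∀ (p : String × String) (dflt : String),
          ((PySem.Dict.empty.insert F.1.1 (pvLabel stops 1 F.1.1)).insert F.2.1 (pvLabel stops 2 F.2.1)).getD p dflt
            = if p = F.1.1 then pvLabel stops 1 F.1.1 else if p = F.2.1 then pvLabel stops 2 F.2.1 else dflt := by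
        intro p dflt
        by_cases h1 : p = F.1.1
        · simp [PySem.Dict.getD, PySem.Dict.get?, hlab, h1]
        · by_cases h2 : p = F.2.1
          · simp [PySem.Dict.getD, PySem.Dict.get?, hlab, List.find?, beq_iff_eq, h2, hne, Ne.symm hne]
          · have hb1 : (F.1.1 == p) = false := by simpa [beq_iff_eq] using Ne.symm h1
            have hb2 : (F.2.1 == p) = false := by simpa [beq_iff_eq] using Ne.symm h2
            simp [PySem.Dict.getD, PySem.Dict.get?, hlab, List.find?, hb1, hb2, h1, h2]
      apply List.map_congr_left
      intro tr _
      rw [hget, hget]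
      by_cases hp2 : C.2.getD tr.1 ("", "") = F.2.1
      · simp [hp2, Ne.symm hne]
      · by_cases hp1 : C.2.getD tr.1 ("", "") = F.1.1 <;> simp [hp1, hp2, hne]
    · have hb : PySem.List.insertBy (fun u v => decide (v.2 < u.2)) i1 [i0] = [i0, i1] := by
        rw [pvInsertBy_cons, pvInsertBy_nil]
        simp only [show (decide (i0.2 < i1.2)) = false by simpa using h0]
        rfl
      obtain ⟨t', heq, _⟩ := pvTop2Loop rest i0 i1 [] (by simp; omega)
      rw [if_neg h0]
      set F := rest.foldl
        (fun (p : ((String × String) × Int) × ((String × String) × Int)) item =>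
          if item.2 > p.1.2 then (item, p.1)
          else if item.2 > p.2.2 then (p.1, item)
          else p) (i0, i1) with hF
      rw [hs', hb, heq]
      have hperm : (F.1 :: F.2 :: t').Perm (i0 :: i1 :: rest) := by
        have hp := PySem.List.sorted_perm (i0 :: i1 :: rest) (fun kv => kv.2) true
        rw [hs', hb, heq] at hp
        exact hp
      have hnd' : ((i0 :: i1 :: rest).map (fun x => x.1)).Nodup := by
        simp only [PySem.Dict.keys, hI] at hnd
        exact hnd
      have hndF : ((F.1 :: F.2 :: t').map (fun x => x.1)).Nodup :=
        ((hperm.map (fun x => x.1)).nodup_iff).mpr hnd'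
      have hne : F.1.1 ≠ F.2.1 := by
        simp only [List.map_cons, List.nodup_cons, List.mem_cons] at hndF
        exact fun h => hndF.1 (Or.inl h)
      simp only [List.take_succ_cons, List.take_zero, List.length_cons, List.length_nil]
      rw [if_neg (by omega)]
      rw [pvEnum2]
      simp only [List.foldl_cons, List.foldl_nil, List.headD_cons]
      have hlab : ((PySem.Dict.empty.insert F.1.1 (pvLabel stops 1 F.1.1)).insert F.2.1 (pvLabel stops 2 F.2.1)).items
          = [(F.1.1, pvLabel stops 1 F.1.1), (F.2.1, pvLabel stops 2 F.2.1)] := by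
        simp [PySem.Dict.insert, PySem.Dict.empty, PySem.Dict.contains, hne]
      have hget : ∀ (p : String × String) (dflt : String),
          ((PySem.Dict.empty.insert F.1.1 (pvLabel stops 1 F.1.1)).insert F.2.1 (pvLabel stops 2 F.2.1)).getD p dflt
            = if p = F.1.1 then pvLabel stops 1 F.1.1 else if p = F.2.1 then pvLabel stops 2 F.2.1 else dflt := by
        intro p dflt
        by_cases h1 : p = F.1.1
        · simp [PySem.Dict.getD, PySem.Dict.get?, hlab, h1]
        · by_cases h2 : p = F.2.1
          · simp [PySem.Dict.getD, PySem.Dict.get?, hlab, List.find?, beq_iff_eq, h2, hne, Ne.symm hne]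
          · have hb1 : (F.1.1 == p) = false := by simpa [beq_iff_eq] using Ne.symm h1
            have hb2 : (F.2.1 == p) = false := by simpa [beq_iff_eq] using Ne.symm h2
            simp [PySem.Dict.getD, PySem.Dict.get?, hlab, List.find?, hb1, hb2, h1, h2]
      apply List.map_congr_left
      intro tr _
      rw [hget, hget]
      by_cases hp2 : C.2.getD tr.1 ("", "") = F.2.1
      · simp [hp2, Ne.symm hne]
      · by_cases hp1 : C.2.getD tr.1 ("", "") = F.1.1 <;> simp [hp1, hp2, hne]
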